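-- pv_equiv track=rewrite | github.com/Dantes19xx/kata_solutions | kyu_6/get_consective_items.py | get_consective_items
-- ===== SOURCE A (Python) =====
-- def get_consective_items(items, key):
--     items = str(items)
--     key = str(key)
--     max_cons_count = 0
--     cons_count = 0
--
--     for i in items:
--         if i == key:
--              cons_count += 1
--         else:
--             if cons_count > max_cons_count:
--                 max_cons_count = cons_count
--             cons_count = 0
--
--     if cons_count > max_cons_count:
--         max_cons_count = cons_count
--
--     return max_cons_count
-- ===== SOURCE B (Python) =====
-- def get_consective_items(items, key):
--     s = str(items)
--     k = str(key)
--     n = len(s)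
--     best = 0
--     i = 0
--     while i < n:
--         j = i
--         while j < n and s[j] == s[i]:
--             j += 1
--         if s[i] == k and j - i > best:
--             best = j - i
--         i = j
--     return best
-- ===== Notes on version B (the rewrite author's own statement) =====
-- stated objective: alternative
-- what changed: B replaces A's single-pass running-count/max-tracking scan with a run-decomposition: it skips over each maximal run of identical characters with an inner pointer and maximises the lengths of the runs whose character equals the key.
import Mathlib
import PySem

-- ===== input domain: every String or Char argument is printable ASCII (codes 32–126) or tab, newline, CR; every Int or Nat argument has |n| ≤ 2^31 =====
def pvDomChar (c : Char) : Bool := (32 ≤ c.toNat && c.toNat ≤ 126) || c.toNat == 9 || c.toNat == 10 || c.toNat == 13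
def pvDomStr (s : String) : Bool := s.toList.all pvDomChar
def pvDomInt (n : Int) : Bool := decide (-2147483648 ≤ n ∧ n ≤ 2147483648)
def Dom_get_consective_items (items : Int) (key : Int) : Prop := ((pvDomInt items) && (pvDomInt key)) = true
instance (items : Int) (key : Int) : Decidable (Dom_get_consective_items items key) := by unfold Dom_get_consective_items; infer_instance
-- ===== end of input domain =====

-- B replaces A's running-count/max-tracking scan with a run-decomposition that skips each
-- maximal run of identical characters and maximises lengths of the runs matching the key
-- (objective: alternative, same cost). Proved equal on all inputs (both are total).

-- ===== PORT A =====
-- the loop body of A: state = (max_cons_count, cons_count); i == key compares the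
-- one-character string [i] with the key string
def pvAStep (k : List Char) (st : Int × Int) (i : Char) : Int × Int :=
  if [i] = k then (st.1, st.2 + 1)
  else (if st.2 > st.1 then st.2 else st.1, 0)

def get_consective_items (items : Int) (key : Int) : Int :=
  let itemsS : List Char := (PySem.Int.toStr items).toList
  let keyS : List Char := (PySem.Int.toStr key).toList
  let st := itemsS.foldl (pvAStep keyS) (0, 0)
  if st.2 > st.1 then st.2 else st.1

-- ===== PORT B =====
-- inner while loop of B: consume the leading run of character c, returning its length
-- (beyond the first char) and the remainder
def pvSplitRun (c : Char) : List Char → Nat × List Char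
  | [] => (0, [])
  | x :: xs =>
    if x = c then
      let r := pvSplitRun c xs
      (r.1 + 1, r.2)
    else (0, x :: xs)

theorem pvSplitRun_len_le (c : Char) (s : List Char) : (pvSplitRun c s).2.length ≤ s.length := by
  induction s with
  | nil => simp [pvSplitRun]
  | cons x xs ih =>
    simp only [pvSplitRun]
    split
    · simpa using Nat.le_succ_of_le ih
    · simp

-- outer while loop of B
def pvBGo (k : List Char) (best : Int) : List Char → Int
  | [] => best
  | x :: xs =>
    let r := pvSplitRun x xs
    let len : Int := (r.1 : Int) + 1
    pvBGo k (if [x] = k ∧ len > best then len else best) r.2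
termination_by s => s.length
decreasing_by
  simpa using Nat.lt_succ_of_le (pvSplitRun_len_le x xs)

def get_consective_items_alt (items : Int) (key : Int) : Int :=
  pvBGo ((PySem.Int.toStr key).toList) 0 ((PySem.Int.toStr items).toList)

-- ===== PRECONDITION & SPEC =====
def Spec_get_consective_items (items : Int) (key : Int) (out : Int) : Prop := out = get_consective_items_alt items key
instance (items : Int) (key : Int) (out : Int) : Decidable (Spec_get_consective_items items key out) := by unfold Spec_get_consective_items; infer_instance

-- ===== CLAIM (what is proved, stated in full; the proofs are below) =====
def Claim_equal_get_consective_items : Prop := ∀ (items : Int) (key : Int), Dom_get_consective_items items key → Spec_get_consective_items items key (get_consective_items items key)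

-- ===== LEMMAS AND PROOFS =====

-- characterisation of pvSplitRun: it peels off a replicate prefix and the rest starts differently
theorem pvSplitRun_eq (c : Char) (s : List Char) :
    s = List.replicate (pvSplitRun c s).1 c ++ (pvSplitRun c s).2 ∧
    (∀ y ys, (pvSplitRun c s).2 = y :: ys → y ≠ c) := by
  induction s with
  | nil => simp [pvSplitRun]
  | cons x xs ih =>
    simp only [pvSplitRun]
    split
    · rename_i hx
      subst hx
      refine ⟨?_, ih.2⟩
      conv_lhs => rw [ih.1]
      simp [List.replicate_succ]
    · rename_i hx
      exact ⟨by simp, by intro y ys h; cases h; simpa using hx⟩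

-- A's fold over a run of the key character just increments the counter
theorem foldA_replicate_key (k : List Char) (x : Char) (hx : [x] = k) (n : Nat)
    (m c : Int) :
    (List.replicate n x).foldl (pvAStep k) (m, c) = (m, c + n) := by
  induction n generalizing c with
  | zero => simp
  | succ n ih =>
    simp only [List.replicate_succ, List.foldl_cons, pvAStep, if_pos hx, ih]
    congr 1
    push_cast
    ring

-- A's fold over a run of a non-key character flushes the counter and then idles
theorem foldA_replicate_other (k : List Char) (x : Char) (hx : ¬ [x] = k) (n : Nat)
    (m : Int) (hm : 0 ≤ m) :
    (List.replicate n x).foldl (pvAStep k) (m, 0) = (m, 0) := by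
  induction n with
  | zero => simp
  | succ n ih =>
    simp only [List.replicate_succ, List.foldl_cons, pvAStep, if_neg hx]
    rw [show (if (0:Int) > m then (0:Int) else m) = m by split <;> omega]
    exact ih

-- main invariant: at a run boundary A's state (m, c) with best = max m c matches B
theorem main_inv (k : List Char) : ∀ (n : Nat) (s : List Char), s.length ≤ n →
    ∀ (m c : Int), 0 ≤ m → 0 ≤ c →
    (c ≠ 0 → ∀ y ys, s = y :: ys → ¬ [y] = k) →
    (let st := s.foldl (pvAStep k) (m, c); if st.2 > st.1 then st.2 else st.1)
      = pvBGo k (max m c) s := by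
  intro n
  induction n with
  | zero =>
    intro s hs m c hm hc _
    have : s = [] := by cases s with | nil => rfl | cons a b => simp at hs
    subst this
    simp only [List.foldl_nil, pvBGo]
    split <;> omega
  | succ n ih =>
    intro s hs m c hm hc hhead
    match s with
    | [] =>
      simp only [List.foldl_nil, pvBGo]
      split <;> omega
    | x :: xs =>
      have hsr := pvSplitRun_eq x xs
      have hlen := pvSplitRun_len_le x xs
      rcases hq : pvSplitRun x xs with ⟨cnt, rest⟩
      rw [hq] at hsr hlen
      simp only at hsr hlen
      have hlen' : rest.length ≤ n := by
        simp at hs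
        omega
      have hdec : x :: xs = (x :: List.replicate cnt x) ++ rest := by
        conv_lhs => rw [hsr.1]
        rw [List.cons_append]
      by_cases hx : [x] = k
      · have hc0 : c = 0 := by
          by_contra h
          exact hhead h x xs rfl hx
        subst hc0
        have hrest : ∀ y ys, rest = y :: ys → ¬ [y] = k := by
          intro y ys hyys hyk
          have := hsr.2 y ys hyys
          rw [← hx] at hyk
          exact this (by injection hyk)
        have hfold : (x :: xs).foldl (pvAStep k) (m, 0)
            = rest.foldl (pvAStep k) (m, (cnt : Int) + 1) := by
          conv_lhs => rw [hdec]
          rw [List.foldl_append]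
          congr 1
          simp only [List.foldl_cons, pvAStep, if_pos hx]
          rw [foldA_replicate_key k x hx]
          congr 1
          push_cast
          ring
        simp only [hfold]
        have hih := ih rest hlen' m ((cnt : Int) + 1) hm (by positivity) (fun _ => hrest)
        simp only [hih]
        simp only [pvBGo, hq]
        congr 1
        simp only [hx, true_and]
        split <;> omega
      · have hfold : (x :: xs).foldl (pvAStep k) (m, c)
            = rest.foldl (pvAStep k) (max m c, 0) := by
          conv_lhs => rw [hdec]
          rw [List.foldl_append]
          simp only [List.foldl_cons, pvAStep, if_neg hx]
          rw [show (if c > m then c else m) = max m c by split <;> omega]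
          rw [foldA_replicate_other k x hx _ _ (by omega)]
        simp only [hfold]
        have hih := ih rest hlen' (max m c) 0 (by omega) le_rfl (by simp)
        simp only [hih]
        simp only [pvBGo, hq, hx, false_and, if_false]
        congr 1
        omega

-- ===== VERDICT (by name: the statement is the Claim_ definition above) =====
theorem get_consective_items_spec : Claim_equal_get_consective_items := by
  intro items key _
  unfold Spec_get_consective_items get_consective_items get_consective_items_alt
  have := main_inv ((PySem.Int.toStr key).toList) ((PySem.Int.toStr items).toList).length
    ((PySem.Int.toStr items).toList) le_rfl 0 0 le_rfl le_rfl (by simp)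
  simpa using this
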